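-- pv_equiv track=rewrite | github.com/pietdevaere/muchosledjes | ledDisplay.py | bin_to_decarray
-- ===== SOURCE A (Python) =====
-- def bin_to_decarray(binary):
--     """converts the array of 7 rows of binary data to an array with seven arrays of bytes"""
--     result = []
--     for row in binary:
--         ## split up the string in groups of eight bits
--         groups = [row[i:i+8] for i in range(0, len(row), 8)]
--         decrow = []
--         for group in groups: ## convert each group to an integer
--             while len(group) < 8:  ## pad with zeros for the int conversion function
--                 group += '0'
--             decrow.append( int(group, 2) )
--         decrow = decrow + (BYTESONLINE - len(decrow)) * [0] ## pad with zeros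
--         result.append(decrow)
--     return(result)
--
-- BYTESONLINE = 27
-- ===== SOURCE B (Python) =====
-- BYTESONLINE = 27
--
-- def bin_to_decarray(binary):
--     """converts the array of 7 rows of binary data to an array with seven arrays of bytes"""
--     bit = {'0': 0, '1': 1}
--     result = []
--     for row in binary:
--         decrow = []
--         acc = 0
--         count = 0
--         for c in row:
--             acc = acc * 2 + bit[c]
--             count += 1
--             if count == 8:
--                 decrow.append(acc)
--                 acc = 0
--                 count = 0
--         if count:
--             decrow.append(acc << (8 - count))
--         while len(decrow) < BYTESONLINE:
--             decrow.append(0)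
--         result.append(decrow)
--     return result
-- ===== Notes on version B (the rewrite author's own statement) =====
-- stated objective: alternative
-- what changed: Per row, a single left-to-right pass with a bit accumulator and counter replaces A's slicing into 8-char groups, while-loop string padding and int(group,2); the trailing partial byte becomes arithmetic (acc << (8-count)).
import Mathlib
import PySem

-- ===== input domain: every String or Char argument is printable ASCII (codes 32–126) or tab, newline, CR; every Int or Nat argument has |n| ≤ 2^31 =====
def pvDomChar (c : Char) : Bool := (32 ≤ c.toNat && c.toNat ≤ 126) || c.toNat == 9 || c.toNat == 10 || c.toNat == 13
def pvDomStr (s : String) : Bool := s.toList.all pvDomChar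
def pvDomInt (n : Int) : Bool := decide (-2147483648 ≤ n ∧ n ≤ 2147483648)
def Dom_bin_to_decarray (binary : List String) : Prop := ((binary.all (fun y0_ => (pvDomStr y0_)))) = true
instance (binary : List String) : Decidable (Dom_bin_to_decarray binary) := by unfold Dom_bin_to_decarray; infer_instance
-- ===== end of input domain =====

-- B replaces A's group slicing + while-loop string padding + int(group,2) by one
-- left-to-right pass per row with a bit accumulator; return values proved equal on Pre_.

-- ===== PORT A =====
-- hand port of int(g, 2): exact when g is a nonempty string of '0'/'1' digits
-- (guaranteed under Pre_; int's leniency on whitespace/sign/underscores lies outside Pre_)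
def pvInt2 (g : List Char) : Int := g.foldl (fun a c => a * 2 + (if c = '1' then 1 else 0)) 0

-- while len(group) < 8: group += '0'
def pvPad8 (g : List Char) : List Char :=
  if g.length < 8 then pvPad8 (g ++ ['0']) else g
termination_by 8 - g.length
decreasing_by simp [List.length_append]; omega

def bin_to_decarray (binary : List String) : List (List Int) :=
  binary.foldl (fun result row =>
    let groups := (PySem.List.pyRange 0 (PySem.Str.len row) 8).map
      (fun i => PySem.List.slice row.toList (some i) (some (i + 8)))
    let decrow := groups.foldl (fun dr group => dr ++ [pvInt2 (pvPad8 group)]) []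
    -- Python's (BYTESONLINE - len(decrow)) * [0] is [] for a negative count, as is Nat subtraction here
    result ++ [decrow ++ List.replicate (27 - decrow.length) (0 : Int)]) []

-- ===== PORT B =====
-- bit[c] for the dict {'0':0,'1':1}; exact on '0'/'1' (the KeyError on other chars lies outside Pre_)
def pvBit (c : Char) : Int := if c = '1' then 1 else 0

-- while len(decrow) < BYTESONLINE: decrow.append(0)
def pvPad27 (d : List Int) : List Int :=
  if d.length < 27 then pvPad27 (d ++ [0]) else d
termination_by 27 - d.length
decreasing_by simp [List.length_append]; omega

-- the per-row character loop of B: decrow/acc/count state; acc << (8-count) is acc * 2^(8-count)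
def pvAltLoop : List Char → List Int → Int → Nat → List Int
  | [], decrow, acc, count =>
      pvPad27 (if count ≠ 0 then decrow ++ [acc * 2 ^ (8 - count)] else decrow)
  | c :: rest, decrow, acc, count =>
      if count + 1 = 8 then pvAltLoop rest (decrow ++ [acc * 2 + pvBit c]) 0 0
      else pvAltLoop rest decrow (acc * 2 + pvBit c) (count + 1)

def bin_to_decarray_alt (binary : List String) : List (List Int) :=
  binary.foldl (fun result row => result ++ [pvAltLoop row.toList [] 0 0]) []

-- ===== PRECONDITION & SPEC =====
-- Pre_ admits exactly the rows made of '0'/'1' only: on other rows A raises ValueError in int(group,2),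
-- except for a sliver (underscores/whitespace/sign that int's lenient base-2 parsing accepts after
-- padding, e.g. ['1_']) where A still returns while B raises KeyError on the non-binary character.
def Pre_bin_to_decarray (binary : List String) : Prop :=
  (binary.all (fun row => row.toList.all (fun c => c == '0' || c == '1'))) = true
instance (binary : List String) : Decidable (Pre_bin_to_decarray binary) := by
  unfold Pre_bin_to_decarray; infer_instance

def pvWitness_bin_to_decarray : List String := ["10", "1", ""]

def Spec_bin_to_decarray (binary : List String) (out : List (List Int)) : Prop :=
  out = bin_to_decarray_alt binary
instance (binary : List String) (out : List (List Int)) : Decidable (Spec_bin_to_decarray binary out) := by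
  unfold Spec_bin_to_decarray; infer_instance

-- ===== CLAIM (what is proved, stated in full; the proofs are below) =====
def Claim_equal_bin_to_decarray : Prop :=
  ∀ (binary : List String), Dom_bin_to_decarray binary → Pre_bin_to_decarray binary →
    Spec_bin_to_decarray binary (bin_to_decarray binary)

-- ===== LEMMAS AND PROOFS =====

-- parse-chunks of a row: the common value both per-row computations are reduced to
def pvPC (cs : List Char) : List Int :=
  if cs.isEmpty then [] else pvInt2 (pvPad8 (cs.take 8)) :: pvPC (cs.drop 8)
termination_by cs.length
decreasing_by cases cs <;> simp_all

theorem pv_foldl_app {α β : Type} (f : α → β) (l : List α) (init : List β) :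
    l.foldl (fun acc x => acc ++ [f x]) init = init ++ l.map f := by
  induction l generalizing init with
  | nil => simp
  | cons x xs ih => simp [List.foldl_cons, ih]

theorem pvInt2_concat (g : List Char) (c : Char) :
    pvInt2 (g ++ [c]) = pvInt2 g * 2 + pvBit c := by
  simp [pvInt2, pvBit, List.foldl_append]

theorem pvPad8_eval (g : List Char) (h : g.length ≤ 8) :
    pvInt2 (pvPad8 g) = pvInt2 g * 2 ^ (8 - g.length) := by
  induction g using pvPad8.induct with
  | case1 g hlt ih =>
    rw [pvPad8, if_pos hlt, ih (by simp; omega)]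
    rw [pvInt2_concat]
    have : (8 - g.length) = (8 - (g ++ ['0']).length) + 1 := by simp; omega
    rw [this, pow_succ]
    simp [pvBit]; ring
  | case2 g hge =>
    rw [pvPad8, if_neg hge]
    have : g.length = 8 := by omega
    simp [this]

theorem pvPad27_eval (d : List Int) :
    d ++ List.replicate (27 - d.length) 0 = pvPad27 d := by
  induction d using pvPad27.induct with
  | case1 d hlt ih =>
    rw [pvPad27, if_pos hlt]
    rw [← ih]
    have h1 : 27 - d.length = (27 - (d ++ [(0:Int)]).length) + 1 := by simp; omega
    rw [h1, List.replicate_succ]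
    simp
  | case2 d hge =>
    rw [pvPad27, if_neg hge]
    have : 27 - d.length = 0 := by omega
    simp [this]

theorem pvAltLoop_eval (cs : List Char) : ∀ (pre : List Char) (d : List Int), pre.length < 8 →
    pvAltLoop cs d (pvInt2 pre) pre.length = pvPad27 (d ++ pvPC (pre ++ cs)) := by
  induction cs with
  | nil =>
    intro pre d h
    rcases eq_or_ne pre [] with rfl | hne
    · simp [pvAltLoop, pvPC]
    · have hlen : pre.length ≠ 0 := by simpa [List.length_eq_zero_iff] using hne
      rw [pvAltLoop, if_pos hlen]
      have hPC : pvPC pre = [pvInt2 (pvPad8 pre)] := by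
        rw [pvPC]
        have htake : pre.take 8 = pre := List.take_of_length_le (by omega)
        have hdrop : pre.drop 8 = [] := List.drop_eq_nil_of_le (by omega)
        simp [hne, htake, hdrop, pvPC]
      rw [List.append_nil, hPC, pvPad8_eval pre (by omega)]
  | cons c rest ih =>
    intro pre d h
    rcases eq_or_ne (pre.length + 1) 8 with h8 | h8
    · rw [pvAltLoop, if_pos h8]
      have h0 := ih [] (d ++ [pvInt2 pre * 2 + pvBit c]) (by simp)
      simp only [show pvInt2 [] = 0 from rfl, List.length_nil, List.nil_append] at h0
      rw [h0]
      have hsplit : pre ++ c :: rest = (pre ++ [c]) ++ rest := by simp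
      have hlen8 : (pre ++ [c]).length = 8 := by simp; omega
      have hPC : pvPC (pre ++ c :: rest) = pvInt2 (pvPad8 (pre ++ [c])) :: pvPC rest := by
        rw [hsplit, pvPC, if_neg (by simp)]
        rw [show ((pre ++ [c]) ++ rest).take 8 = pre ++ [c] from by rw [← hlen8, List.take_left],
            show ((pre ++ [c]) ++ rest).drop 8 = rest from by rw [← hlen8, List.drop_left]]
      have hpad : pvPad8 (pre ++ [c]) = pre ++ [c] := by
        rw [pvPad8, if_neg (by omega)]
      rw [hPC, hpad, pvInt2_concat]
      simp
    · rw [pvAltLoop, if_neg h8]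
      have h1 := ih (pre ++ [c]) d (by simp; omega)
      rw [pvInt2_concat] at h1
      simp only [List.length_append, List.length_cons, List.length_nil] at h1
      simpa using h1

theorem pvPC_range (cs : List Char) :
    (List.range ((cs.length + 7) / 8)).map
      (fun k => pvInt2 (pvPad8 ((cs.drop (8 * k)).take 8))) = pvPC cs := by
  induction cs using pvPC.induct with
  | case1 cs hemp => simp_all [List.isEmpty_iff, pvPC]
  | case2 cs hemp ih =>
    have hne : cs ≠ [] := by simpa [List.isEmpty_iff] using hemp
    have hpos : 0 < cs.length := List.length_pos_iff.mpr hne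
    have hm : (cs.length + 7) / 8 = ((cs.drop 8).length + 7) / 8 + 1 := by
      simp [List.length_drop]; omega
    rw [hm, List.range_succ_eq_map, List.map_cons, List.map_map]
    rw [pvPC]
    simp only [hemp, Bool.false_eq_true, if_false]
    refine congrArg₂ List.cons ?_ ?_
    · simp
    · rw [← ih]
      apply List.map_congr_left
      intro k _
      simp only [Function.comp_apply, List.drop_drop, Nat.succ_eq_add_one]
      ring_nf
theorem pv_groups_eq (row : List Char) :
    (PySem.List.pyRange 0 (row.length : Int) 8).map
        (fun i => PySem.List.slice row (some i) (some (i + 8)))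
      = (List.range ((row.length + 7) / 8)).map (fun k => (row.drop (8 * k)).take 8) := by
  rw [PySem.List.pyRange_of_pos 0 (row.length : Int) (by norm_num), List.map_map]
  have hcnt : (if (0:Int) < (row.length : Int) then (((row.length : Int) - 0 + 8 - 1) / 8).toNat else 0)
      = (row.length + 7) / 8 := by
    split_ifs with h
    · omega
    · omega
  rw [hcnt]
  apply List.map_congr_left
  intro k _
  show PySem.List.slice row (some (0 + 8 * (k : Int))) (some (0 + 8 * (k : Int) + 8)) = _
  have e1 : (0 + 8 * (k : Int)) = ((8 * k : Nat) : Int) := by push_cast; ring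
  have e2 : (0 + 8 * (k : Int) + 8) = ((8 * k + 8 : Nat) : Int) := by push_cast; ring
  rw [e2, e1, PySem.List.slice_natCast]
  congr 1
  omega

theorem pv_row_eq (row : String) :
    (((PySem.List.pyRange 0 (PySem.Str.len row) 8).map
        (fun i => PySem.List.slice row.toList (some i) (some (i + 8)))).foldl
      (fun dr group => dr ++ [pvInt2 (pvPad8 group)]) [])
      ++ List.replicate (27 - (((PySem.List.pyRange 0 (PySem.Str.len row) 8).map
        (fun i => PySem.List.slice row.toList (some i) (some (i + 8)))).foldl
      (fun dr group => dr ++ [pvInt2 (pvPad8 group)]) []).length) (0 : Int)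
      = pvAltLoop row.toList [] 0 0 := by
  have hlen : PySem.Str.len row = (row.toList.length : Int) := by
    simp [PySem.Str.len_eq]
  rw [hlen, pv_foldl_app (fun g => pvInt2 (pvPad8 g)), List.nil_append,
      pv_groups_eq, List.map_map]
  have hchunks : ((List.range ((row.toList.length + 7) / 8)).map
      ((fun g => pvInt2 (pvPad8 g)) ∘ fun k => (row.toList.drop (8 * k)).take 8)) = pvPC row.toList := by
    rw [← pvPC_range]; rfl
  rw [hchunks, pvPad27_eval]
  have h0 := pvAltLoop_eval row.toList [] [] (by simp)
  simp only [pvInt2, List.foldl_nil, List.length_nil, List.nil_append] at h0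
  rw [h0]

-- ===== VERDICT (by name: the statement is the Claim_ definition above) =====
theorem bin_to_decarray_spec : Claim_equal_bin_to_decarray := by
  intro binary _ _
  show bin_to_decarray binary = bin_to_decarray_alt binary
  unfold bin_to_decarray bin_to_decarray_alt
  rw [pv_foldl_app, pv_foldl_app]
  apply congrArg
  apply List.map_congr_left
  intro row _
  exact pv_row_eq row
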